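-- pv_equiv track=rewrite | github.com/filips1/Lamacz_playfair | playfair.py | padding
-- ===== SOURCE A (Python) =====
-- def padding(message):  # wpisywanie znkaku jeśli obok siebie są 2 takie same litery lub gdy liczba liter jest nieparzysta :D
--     list_message=list(message)
--     i = 1
--     while i < len(list_message):            #sprawdzanie czy 2 litery obok siebie są równe
--         if list_message[i]==list_message[i-1]:
--             list_message.insert(i, 'X')
--         i += 2
--     if len(list_message)%2!=0:  #sprawdzanie parzystości liter
--         list_message.append('X')
--     padded_message = []
--     for a in range(0, len(list_message), 2):
--         padded_message.append(''.join(list_message[a:a+2])) #dzielenie szyfru w pary liter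
--     return padded_message
-- ===== SOURCE B (Python) =====
-- def padding(message):
--     # Single left-to-right cursor scan emitting pairs directly:
--     # no mutable insertion, no parity append, no grouping pass.
--     out = []
--     i = 0
--     n = len(message)
--     while i < n:
--         a = message[i]
--         if i + 1 < n:
--             if message[i + 1] == a:
--                 out.append(a + 'X')
--                 i += 1
--             else:
--                 out.append(a + message[i + 1])
--                 i += 2
--         else:
--             out.append(a + 'X')
--             i += 2
--     return out
-- ===== Notes on version B (the rewrite author's own statement) =====
-- stated objective: faster
-- what changed: Replaces A's three-phase pipeline (in-place X insertion into a mutable list, odd-length append, then a range-stride grouping pass) with a single cursor scan that emits each output pair directly, advancing by 1 on a duplicate and 2 otherwise.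
import Mathlib
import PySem

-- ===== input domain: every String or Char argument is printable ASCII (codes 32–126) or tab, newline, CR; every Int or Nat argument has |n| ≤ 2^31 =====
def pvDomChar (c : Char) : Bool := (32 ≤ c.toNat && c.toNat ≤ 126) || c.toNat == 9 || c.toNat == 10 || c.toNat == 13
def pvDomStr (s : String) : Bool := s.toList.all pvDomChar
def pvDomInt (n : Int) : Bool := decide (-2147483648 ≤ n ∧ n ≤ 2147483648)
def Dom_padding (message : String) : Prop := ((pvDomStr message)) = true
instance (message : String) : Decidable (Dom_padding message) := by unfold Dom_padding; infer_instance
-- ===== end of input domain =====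

-- B replaces A's mutate-then-append-then-group pipeline with one cursor scan emitting
-- the pairs directly (objective: faster — no per-duplicate list.insert tail shifting).

-- ===== PORT A =====
-- while i < len(list_message): if list_message[i]==list_message[i-1]: insert 'X' at i; i += 2
def padALoop (l : List Char) (i : Nat) : List Char :=
  if _h : i < l.length then
    if l[i]? == l[i-1]? then
      padALoop (PySem.List.insert l (i : Int) 'X') (i + 2)
    else
      padALoop l (i + 2)
  else l
termination_by l.length + 1 - i
decreasing_by
  · simp [PySem.List.length_insert]; omega
  · omega

def padding (message : String) : List String :=
  let l1 := padALoop message.toList 1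
  let l2 := if l1.length % 2 ≠ 0 then l1 ++ ['X'] else l1
  -- for a in range(0, len(list_message), 2): append ''.join(list_message[a:a+2])
  (PySem.List.pyRange 0 (l2.length : Int) 2).foldl
    (fun acc a => acc ++ [String.ofList (PySem.List.slice l2 (some a) (some (a + 2)))]) []

-- ===== PORT B =====
-- single cursor scan: while i < n, emit a pair and advance by 1 (duplicate) or 2
def padBLoop (s : List Char) (i : Nat) (out : List String) : List String :=
  if h : i < s.length then
    let a := s[i]
    if hb : i + 1 < s.length then
      if s[i + 1] == a then padBLoop s (i + 1) (out ++ [String.ofList [a, 'X']])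
      else padBLoop s (i + 2) (out ++ [String.ofList [a, s[i + 1]]])
    else padBLoop s (i + 2) (out ++ [String.ofList [a, 'X']])
  else out
termination_by s.length - i

def padding_alt (message : String) : List String := padBLoop message.toList 0 []

-- ===== PRECONDITION & SPEC =====
def Spec_padding (message : String) (out : List String) : Prop := out = padding_alt message
instance (message : String) (out : List String) : Decidable (Spec_padding message out) := by unfold Spec_padding; infer_instance

-- ===== CLAIM (what is proved, stated in full; the proofs are below) =====
def Claim_equal_padding : Prop := ∀ (message : String), Dom_padding message → Spec_padding message (padding message)

-- ===== LEMMAS AND PROOFS =====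

-- recursive pair view of B's cursor loop
def padBGo : List Char → List String
  | [] => []
  | [a] => [String.ofList [a, 'X']]
  | a :: b :: rest =>
    if b == a then String.ofList [a, 'X'] :: padBGo (b :: rest)
    else String.ofList [a, b] :: padBGo rest

lemma padBLoop_eq : ∀ (s : List Char) (i : Nat) (out : List String),
    padBLoop s i out = out ++ padBGo (s.drop i) := by
  intro s i out
  refine padBLoop.induct s
    (motive := fun i out => padBLoop s i out = out ++ padBGo (s.drop i)) ?_ ?_ ?_ ?_ i out
  case _ =>
    intro i out h a hb hba ih
    show padBLoop s i out = out ++ padBGo (List.drop i s)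
    rw [padBLoop]
    simp only [dif_pos h, dif_pos hb]
    rw [ih, List.drop_eq_getElem_cons h, List.drop_eq_getElem_cons hb, padBGo, if_pos hba]
    have hba' : s[i + 1] = s[i] := by simpa using hba
    simp [hba', show a = s[i] from rfl]
  case _ =>
    intro i out h a hb hba ih
    show padBLoop s i out = out ++ padBGo (List.drop i s)
    rw [padBLoop]
    simp only [dif_pos h, dif_pos hb]
    rw [ih, List.drop_eq_getElem_cons h, List.drop_eq_getElem_cons hb, padBGo, if_neg hba]
    have hba' : ¬ s[i + 1] = s[i] := by simpa using hba
    simp [hba', show a = s[i] from rfl, show i + 1 + 1 = i + 2 from rfl]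
  case _ =>
    intro i out h a hb ih
    show padBLoop s i out = out ++ padBGo (List.drop i s)
    rw [padBLoop]
    simp only [dif_pos h, dif_neg hb]
    rw [ih, List.drop_eq_getElem_cons h]
    rw [show s.drop (i + 1) = [] from List.drop_eq_nil_iff.mpr (by omega),
        show s.drop (i + 2) = [] from List.drop_eq_nil_iff.mpr (by omega)]
    simp [padBGo, show a = s[i] from rfl]
  case _ =>
    intro i out h
    show padBLoop s i out = out ++ padBGo (List.drop i s)
    rw [padBLoop]
    simp only [dif_neg h]
    rw [show s.drop i = [] from List.drop_eq_nil_iff.mpr (by omega)]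
    simp [padBGo]

-- the grouping pass of A, abstracted: cut into pairs, a lone last char stays alone
def chunkF : List Char → List String
  | [] => []
  | [a] => [String.ofList [a]]
  | a :: b :: r => String.ofList [a, b] :: chunkF r

-- the effect of A's insertion loop on the unprocessed suffix
def fixT : List Char → List Char
  | [] => []
  | [a] => [a]
  | a :: b :: r => if b == a then a :: 'X' :: fixT (b :: r) else a :: b :: fixT r

lemma pyRange2_nil (a b : Int) (h : b ≤ a) : PySem.List.pyRange a b 2 = [] := by
  rw [PySem.List.pyRange_of_pos a b (by norm_num)]
  simp [Int.not_lt.mpr h]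

lemma pyRange2_cons (a b : Int) (h : a < b) :
    PySem.List.pyRange a b 2 = a :: PySem.List.pyRange (a + 2) b 2 := by
  rw [PySem.List.pyRange_of_pos a b (by norm_num),
      PySem.List.pyRange_of_pos (a + 2) b (by norm_num)]
  by_cases h2 : a + 2 < b
  · have hn : ((b - a + 2 - 1) / 2).toNat = ((b - (a + 2) + 2 - 1) / 2).toNat + 1 := by omega
    rw [if_pos h, if_pos h2, hn, List.range_succ_eq_map]
    simp only [List.map_cons, List.map_map]
    congr 1
    · push_cast; ring
    · apply List.map_congr_left; intro k _
      simp only [Function.comp_apply, Nat.succ_eq_add_one]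
      push_cast; ring
  · have hn : ((b - a + 2 - 1) / 2).toNat = 1 := by omega
    rw [if_pos h, if_neg h2, hn]
    simp

lemma slice2 (l0 : List Char) (j : Nat) :
    PySem.List.slice l0 (some (j : Int)) (some ((j : Int) + 2)) = (l0.drop j).take 2 := by
  rw [show ((j : Int) + 2) = ((j : Int) + ((2 : Nat) : Int)) by norm_num,
      PySem.List.slice_natCast_add]

lemma grp (r : List Char) : ∀ (l0 : List Char) (j : Nat), l0.drop j = r → ∀ acc,
    (PySem.List.pyRange (j : Int) (l0.length : Int) 2).foldl
      (fun acc a => acc ++ [String.ofList (PySem.List.slice l0 (some a) (some (a + 2)))]) acc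
    = acc ++ chunkF r := by
  induction r using chunkF.induct with
  | case1 =>
    intro l0 j hd acc
    have hlen : l0.length ≤ j := List.drop_eq_nil_iff.mp hd
    rw [pyRange2_nil _ _ (by exact_mod_cast hlen)]
    simp [chunkF]
  | case2 a =>
    intro l0 j hd acc
    have h1 : l0.length - j = 1 := by
      have := congrArg List.length hd; simpa using this
    have hj : j < l0.length := by omega
    rw [pyRange2_cons _ _ (by exact_mod_cast hj),
        pyRange2_nil ((j : Int) + 2) _ (by omega)]
    simp only [List.foldl_cons, List.foldl_nil, slice2, hd]
    simp [chunkF]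
  | case3 a b r' ih =>
    intro l0 j hd acc
    have h1 : l0.length - j = r'.length + 2 := by
      have := congrArg List.length hd; simpa using this
    have hj : j < l0.length := by omega
    rw [pyRange2_cons _ _ (by exact_mod_cast hj)]
    simp only [List.foldl_cons, slice2, hd]
    rw [show ((j : Int) + 2) = (((j + 2 : Nat)) : Int) by push_cast; ring]
    rw [ih l0 (j + 2) (by rw [← List.drop_drop, hd]; rfl)]
    simp [chunkF]

lemma loopA : ∀ (r done : List Char), padALoop (done ++ r) (done.length + 1) = done ++ fixT r := by
  intro r
  induction r using fixT.induct with
  | case1 => intro done; unfold padALoop; simp [fixT]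
  | case2 a => intro done; unfold padALoop; simp [fixT]
  | case3 a b r' h ih =>
    intro done
    unfold padALoop
    have hlt : done.length + 1 < (done ++ a :: b :: r').length := by simp
    rw [dif_pos hlt]
    have hi : (done ++ a :: b :: r')[done.length + 1]? = some b := by
      rw [List.getElem?_append_right (by omega)]
      simp
    have him : (done ++ a :: b :: r')[done.length + 1 - 1]? = some a := by
      rw [List.getElem?_append_right (by omega)]
      simp
    rw [hi, him, if_pos (by simpa using h)]
    have hins : PySem.List.insert (done ++ a :: b :: r') ((done.length + 1 : Nat) : Int) 'X'
        = (done ++ [a, 'X']) ++ b :: r' := by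
      rw [show done ++ a :: b :: r' = (done ++ [a]) ++ b :: r' by simp]
      rw [PySem.List.insert_natCast _ _ _ (by simp)]
      rw [show done.length + 1 = (done ++ [a]).length by simp]
      rw [List.take_left, List.drop_left]
      simp
    rw [hins, show done.length + 1 + 2 = (done ++ [a, 'X']).length + 1 by simp,
        ih (done ++ [a, 'X'])]
    simp [fixT, h]
  | case4 a b r' h ih =>
    intro done
    unfold padALoop
    have hlt : done.length + 1 < (done ++ a :: b :: r').length := by simp
    rw [dif_pos hlt]
    have hi : (done ++ a :: b :: r')[done.length + 1]? = some b := by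
      rw [List.getElem?_append_right (by omega)]
      simp
    have him : (done ++ a :: b :: r')[done.length + 1 - 1]? = some a := by
      rw [List.getElem?_append_right (by omega)]
      simp
    rw [hi, him, if_neg (by simpa using h)]
    rw [show done ++ a :: b :: r' = (done ++ [a, b]) ++ r' by simp]
    rw [show done.length + 1 + 2 = (done ++ [a, b]).length + 1 by simp,
        ih (done ++ [a, b])]
    simp [fixT, h]

lemma chunk_step (m : List Char) (a x : Char) :
    chunkF (if (a :: x :: m).length % 2 ≠ 0 then (a :: x :: m) ++ ['X'] else a :: x :: m)
    = String.ofList [a, x] :: chunkF (if m.length % 2 ≠ 0 then m ++ ['X'] else m) := by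
  have hl : (a :: x :: m).length % 2 = m.length % 2 := by
    simp only [List.length_cons]; omega
  by_cases hm : m.length % 2 = 0
  · rw [if_neg (by rw [hl]; omega), if_neg (by omega)]; simp [chunkF]
  · rw [if_pos (by rw [hl]; omega), if_pos (by omega)]; simp [chunkF]

lemma chunk_parity : ∀ r : List Char,
    chunkF (if (fixT r).length % 2 ≠ 0 then fixT r ++ ['X'] else fixT r) = padBGo r := by
  intro r
  induction r using fixT.induct with
  | case1 => simp [fixT, chunkF, padBGo]
  | case2 a => simp [fixT, chunkF, padBGo]
  | case3 a b r' h ih =>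
    simp only [fixT, if_pos h]
    rw [chunk_step, ih]
    simp [padBGo, h]
  | case4 a b r' h ih =>
    simp only [fixT, if_neg h]
    rw [chunk_step, ih]
    simp [padBGo, h]

-- ===== VERDICT (by name: the statement is the Claim_ definition above) =====
theorem padding_spec : Claim_equal_padding := by
  intro message _
  unfold Spec_padding padding padding_alt
  have hl : padALoop message.toList 1 = fixT message.toList := by
    have := loopA message.toList []
    simpa using this
  rw [hl]
  rw [show ((0 : Int)) = (((0 : Nat)) : Int) by norm_num]
  rw [grp _ _ 0 rfl []]
  rw [List.nil_append, padBLoop_eq]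
  simp only [List.drop_zero, List.nil_append]
  rw [← chunk_parity message.toList]
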